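-- pv_equiv track=rewrite | github.com/Jingik/codetree-TILs | 241206/놀이기구 탑승/go-on-the-rides.py | check_two
-- ===== SOURCE A (Python) =====
-- Direction = [(0,1), (1, 0), (-1, 0), (0, -1)]
--
-- def isvalid(x, y, n):
--     return 0 <= x < n and 0 <= y < n
--
-- def check_two(grid, check, n, total_list):
--     if check == False:
--         check_student = {4 : [], 3 : [], 2 : [], 1 : [], 0 : []}
--         for x, y in total_list:
--             check_num = 0
--             if grid[x][y] == False:
--                 for dir in Direction:
--                     nx, ny = x + dir[0], y + dir[1]
--                     if isvalid(nx, ny, n) and grid[nx][ny] == False: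
--                         check_num += 1
--                 check_student[check_num].append([x, y])
--
--         for index, value in check_student.items():
--             check_num = len(value)
--             if check_num > 0:
--                 total_list = value
--                 if check_num == 1:
--                     check = True
--                 break
--     return total_list, check
-- ===== SOURCE B (Python) =====
-- def isvalid(x, y, n):
--     return 0 <= x < n and 0 <= y < n
--
-- def check_two(grid, check, n, total_list):
--     if check != False:
--         return total_list, check
--     best = -1
--     best_cells = []
--     for x, y in total_list:
--         if grid[x][y] != False:
--             continue
--         cnt = sum(1 for dx, dy in ((0, 1), (1, 0), (-1, 0), (0, -1))
--                   if isvalid(x + dx, y + dy, n) and grid[x + dx][y + dy] == False)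
--         if cnt > best:
--             best = cnt
--             best_cells = [[x, y]]
--         elif cnt == best:
--             best_cells.append([x, y])
--     if best >= 0:
--         return best_cells, (True if len(best_cells) == 1 else check)
--     return total_list, check
-- ===== Notes on version B (the rewrite author's own statement) =====
-- stated objective: simpler
-- what changed: Replaces A's fixed five-bucket dict (fill all buckets, then scan keys 4..0 for the first non-empty one) by a single running-maximum pass that keeps only the current best count and its cells, so the bucket structure and the second scan disappear.
import Mathlib
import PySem

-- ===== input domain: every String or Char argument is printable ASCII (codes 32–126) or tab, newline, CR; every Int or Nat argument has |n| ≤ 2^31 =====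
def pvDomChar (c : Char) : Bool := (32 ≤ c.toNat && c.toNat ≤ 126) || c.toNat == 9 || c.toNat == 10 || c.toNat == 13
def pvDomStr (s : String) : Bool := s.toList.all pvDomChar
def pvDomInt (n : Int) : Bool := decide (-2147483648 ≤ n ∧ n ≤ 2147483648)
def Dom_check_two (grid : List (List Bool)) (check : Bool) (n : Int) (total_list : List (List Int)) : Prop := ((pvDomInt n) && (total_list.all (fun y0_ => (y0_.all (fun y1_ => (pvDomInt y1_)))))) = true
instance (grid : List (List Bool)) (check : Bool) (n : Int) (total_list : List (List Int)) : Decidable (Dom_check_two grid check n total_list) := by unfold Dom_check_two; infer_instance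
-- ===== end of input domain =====

-- B replaces A's five-bucket dict plus second key scan by one running-maximum pass (objective: simpler).

-- ===== PORT A =====
def pvDirection : List (Int × Int) := [(0, 1), (1, 0), (-1, 0), (0, -1)]

def pvIsvalid (x y n : Int) : Bool := decide (0 ≤ x) && decide (x < n) && decide (0 ≤ y) && decide (y < n)

-- grid[x][y]; exact on Pre_ (both indices in Python range there); default true outside
def pvGridAt (grid : List (List Bool)) (x y : Int) : Bool :=
  PySem.List.pyGetD (PySem.List.pyGetD grid x []) y true

def pvCountA (grid : List (List Bool)) (n x y : Int) : Int :=
  pvDirection.foldl (fun c dir =>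
    if pvIsvalid (x + dir.1) (y + dir.2) n && (pvGridAt grid (x + dir.1) (y + dir.2) == false)
    then c + 1 else c) 0

-- the second loop with its break
def pvPick : List (Int × List (List Int)) → List (List Int) → Bool → List (List Int) × Bool
  | [], tl, ck => (tl, ck)
  | (_, v) :: rest, tl, ck =>
    if v.length > 0 then (v, if v.length == 1 then true else ck)
    else pvPick rest tl ck

def check_two (grid : List (List Bool)) (check : Bool) (n : Int) (total_list : List (List Int)) : List (List Int) × Bool :=
  if check == false then
    let d := total_list.foldl (fun (d : PySem.Dict Int (List (List Int))) p =>
      let x := PySem.List.pyGetD p 0 0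
      let y := PySem.List.pyGetD p 1 0
      if pvGridAt grid x y == false then
        PySem.Dict.modify d (pvCountA grid n x y) [] (fun v => v ++ [[x, y]])
      else d)
      (PySem.Dict.ofList [(4, []), (3, []), (2, []), (1, []), (0, [])])
    pvPick d.items total_list check
  else (total_list, check)

-- ===== PORT B =====
def pvDirs : List (Int × Int) := [(0, 1), (1, 0), (-1, 0), (0, -1)]

def pvIsvalidB (x y n : Int) : Bool := decide (0 ≤ x ∧ x < n ∧ 0 ≤ y ∧ y < n)

def pvEmptyAt (grid : List (List Bool)) (x y : Int) : Bool :=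
  PySem.List.pyGetD (PySem.List.pyGetD grid x []) y true == false

def pvCountB (grid : List (List Bool)) (n x y : Int) : Int :=
  ((pvDirs.filter (fun dr => pvIsvalidB (x + dr.1) (y + dr.2) n && pvEmptyAt grid (x + dr.1) (y + dr.2))).length : Int)

def pvStepB (grid : List (List Bool)) (n : Int) (st : Int × List (List Int)) (p : List Int) : Int × List (List Int) :=
  let x := PySem.List.pyGetD p 0 0
  let y := PySem.List.pyGetD p 1 0
  if pvEmptyAt grid x y then
    let c := pvCountB grid n x y
    if c > st.1 then (c, [[x, y]])
    else if c == st.1 then (st.1, st.2 ++ [[x, y]])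
    else st
  else st

def check_two_alt (grid : List (List Bool)) (check : Bool) (n : Int) (total_list : List (List Int)) : List (List Int) × Bool :=
  if check == true then (total_list, check)
  else
    let st := total_list.foldl (pvStepB grid n) (-1, [])
    if 0 ≤ st.1 then (st.2, if st.2.length == 1 then true else check)
    else (total_list, check)

-- ===== PRECONDITION & SPEC =====
-- exactly the inputs where every index A performs is a valid Python index (negative wraparound included): A raises IndexError/ValueError elsewhere
def pvCellPre (grid : List (List Bool)) (n x y : Int) : Bool :=
  match PySem.List.pyGet? grid x with
  | none => false
  | some row =>
    match PySem.List.pyGet? row y with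
    | none => false
    | some v =>
      v || pvDirection.all (fun dr =>
        !(pvIsvalid (x + dr.1) (y + dr.2) n) ||
        (match PySem.List.pyGet? grid (x + dr.1) with
         | none => false
         | some r2 => (PySem.List.pyGet? r2 (y + dr.2)).isSome))

def Pre_check_two (grid : List (List Bool)) (check : Bool) (n : Int) (total_list : List (List Int)) : Prop :=
  check = true ∨
    total_list.all (fun p =>
      match p with
      | [x, y] => pvCellPre grid n x y
      | _ => false) = true

instance (grid : List (List Bool)) (check : Bool) (n : Int) (total_list : List (List Int)) : Decidable (Pre_check_two grid check n total_list) := by unfold Pre_check_two; infer_instance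

def pvWitness_check_two : List (List Bool) × Bool × Int × List (List Int) :=
  ([[false, true], [false, false]], false, 2, [[0, 0], [1, 1]])

def Spec_check_two (grid : List (List Bool)) (check : Bool) (n : Int) (total_list : List (List Int)) (out : List (List Int) × Bool) : Prop := out = check_two_alt grid check n total_list
instance (grid : List (List Bool)) (check : Bool) (n : Int) (total_list : List (List Int)) (out : List (List Int) × Bool) : Decidable (Spec_check_two grid check n total_list out) := by unfold Spec_check_two; infer_instance

-- ===== CLAIM (what is proved, stated in full; the proofs are below) =====
def Claim_equal_check_two : Prop := ∀ (grid : List (List Bool)) (check : Bool) (n : Int) (total_list : List (List Int)), Dom_check_two grid check n total_list → Pre_check_two grid check n total_list → Spec_check_two grid check n total_list (check_two grid check n total_list)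

-- ===== LEMMAS AND PROOFS =====
-- the two neighbour counters agree
theorem pvCount_eq (grid : List (List Bool)) (n x y : Int) :
    pvCountA grid n x y = pvCountB grid n x y := by
  have hval : ∀ a b : Int, pvIsvalidB a b n = pvIsvalid a b n := by
    intro a b
    by_cases h1 : (0:Int) ≤ a <;> by_cases h2 : a < n <;> by_cases h3 : (0:Int) ≤ b <;>
      by_cases h4 : b < n <;> simp [pvIsvalid, pvIsvalidB, h1, h2, h3, h4]
  have hemp : ∀ a b : Int, pvEmptyAt grid a b = (pvGridAt grid a b == false) := fun _ _ => rfl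
  simp only [pvCountA, pvCountB, pvDirection, pvDirs, hval, hemp,
    List.foldl, List.filter]
  generalize (pvIsvalid (x + 0) (y + 1) n && (pvGridAt grid (x + 0) (y + 1) == false)) = c1
  generalize (pvIsvalid (x + 1) (y + 0) n && (pvGridAt grid (x + 1) (y + 0) == false)) = c2
  generalize (pvIsvalid (x + -1) (y + 0) n && (pvGridAt grid (x + -1) (y + 0) == false)) = c3
  generalize (pvIsvalid (x + 0) (y + -1) n && (pvGridAt grid (x + 0) (y + -1) == false)) = c4
  cases c1 <;> cases c2 <;> cases c3 <;> cases c4 <;> rfl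

-- abbreviations for the reference characterisation
def pvElig (grid : List (List Bool)) (p : List Int) : Bool :=
  pvEmptyAt grid (PySem.List.pyGetD p 0 0) (PySem.List.pyGetD p 1 0)

def pvCnt (grid : List (List Bool)) (n : Int) (p : List Int) : Int :=
  pvCountB grid n (PySem.List.pyGetD p 0 0) (PySem.List.pyGetD p 1 0)

def pvCell (p : List Int) : List Int :=
  [PySem.List.pyGetD p 0 0, PySem.List.pyGetD p 1 0]

def pvBucket (grid : List (List Bool)) (n : Int) (k : Int) (l : List (List Int)) : List (List Int) :=
  (l.filter (fun p => pvElig grid p && pvCnt grid n p == k)).map pvCell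

def pvM (grid : List (List Bool)) (n : Int) (l : List (List Int)) : Int :=
  (l.filter (pvElig grid)).foldl (fun a p => max a (pvCnt grid n p)) (-1)

theorem countB_nonneg (grid : List (List Bool)) (n x y : Int) : 0 ≤ pvCountB grid n x y := by
  unfold pvCountB; positivity

theorem countB_le_four (grid : List (List Bool)) (n x y : Int) : pvCountB grid n x y ≤ 4 := by
  have h := List.length_filter_le
    (fun dr : Int × Int => pvIsvalidB (x + dr.1) (y + dr.2) n && pvEmptyAt grid (x + dr.1) (y + dr.2)) pvDirs
  have h4 : pvDirs.length = 4 := rfl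
  rw [h4] at h
  unfold pvCountB
  omega

theorem cnt_nonneg (grid : List (List Bool)) (n : Int) (p : List Int) : 0 ≤ pvCnt grid n p :=
  countB_nonneg _ _ _ _

theorem cnt_le_four (grid : List (List Bool)) (n : Int) (p : List Int) : pvCnt grid n p ≤ 4 :=
  countB_le_four _ _ _ _

theorem M_mem_or (grid : List (List Bool)) (n : Int) (l : List (List Int)) :
    pvM grid n l = -1 ∨ pvM grid n l ∈ (l.filter (pvElig grid)).map (pvCnt grid n) := by
  have h : pvM grid n l = ((l.filter (pvElig grid)).map (pvCnt grid n)).foldl max (-1) := by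
    unfold pvM; rw [List.foldl_map]
  rw [h]
  exact PySem.List.foldl_max_mem _ _

theorem M_le_four (grid : List (List Bool)) (n : Int) (l : List (List Int)) : pvM grid n l ≤ 4 := by
  rcases M_mem_or grid n l with h | h
  · omega
  · obtain ⟨q, _, hq⟩ := List.mem_map.mp h
    have := cnt_le_four grid n q
    omega

theorem cnt_le_M (grid : List (List Bool)) (n : Int) (l : List (List Int)) (p : List Int)
    (hp : p ∈ l) (he : pvElig grid p = true) : pvCnt grid n p ≤ pvM grid n l := by
  have hmem : p ∈ l.filter (pvElig grid) := List.mem_filter.mpr ⟨hp, he⟩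
  exact (PySem.List.le_foldl_max_int (l.filter (pvElig grid)) (pvCnt grid n) (-1)).2 p hmem

theorem M_lt_bucket_nil (grid : List (List Bool)) (n : Int) (l : List (List Int)) (k : Int)
    (h : pvM grid n l < k) : pvBucket grid n k l = [] := by
  unfold pvBucket
  rw [List.map_eq_nil_iff, List.filter_eq_nil_iff]
  intro p hp hco
  obtain ⟨he, hk⟩ := Bool.and_eq_true_iff.mp hco
  have hk' : pvCnt grid n p = k := by simpa using hk
  have := cnt_le_M grid n l p hp he
  omega

theorem bucket_M_ne_nil (grid : List (List Bool)) (n : Int) (l : List (List Int))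
    (h : 0 ≤ pvM grid n l) : pvBucket grid n (pvM grid n l) l ≠ [] := by
  rcases M_mem_or grid n l with h1 | h2
  · omega
  · obtain ⟨q, hq, hcq⟩ := List.mem_map.mp h2
    obtain ⟨hql, hqe⟩ := List.mem_filter.mp hq
    have hmem : pvCell q ∈ pvBucket grid n (pvM grid n l) l := by
      unfold pvBucket
      exact List.mem_map_of_mem (List.mem_filter.mpr ⟨hql, by simp [hqe, hcq]⟩)
    exact List.ne_nil_of_mem hmem

theorem bucket_cons (grid : List (List Bool)) (n k : Int) (p : List Int) (l : List (List Int)) :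
    pvBucket grid n k (p :: l) =
      (if pvElig grid p && pvCnt grid n p == k then [pvCell p] else []) ++ pvBucket grid n k l := by
  unfold pvBucket
  cases h : (pvElig grid p && pvCnt grid n p == k) <;> simp [h]

theorem bucket_append (grid : List (List Bool)) (n k : Int) (l : List (List Int)) (p : List Int) :
    pvBucket grid n k (l ++ [p]) =
      pvBucket grid n k l ++ (if pvElig grid p && pvCnt grid n p == k then [pvCell p] else []) := by
  unfold pvBucket
  cases h : (pvElig grid p && pvCnt grid n p == k) <;> simp [List.filter_append, h]

theorem M_append (grid : List (List Bool)) (n : Int) (l : List (List Int)) (p : List Int) :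
    pvM grid n (l ++ [p]) =
      if pvElig grid p then max (pvM grid n l) (pvCnt grid n p) else pvM grid n l := by
  unfold pvM
  cases he : pvElig grid p <;> simp [List.filter_append, he, List.foldl_append]

theorem modify_bucket (b4 b3 b2 b1 b0 : List (List Int)) (v : List Int) (c : Int)
    (h0 : 0 ≤ c) (h4 : c ≤ 4) :
    PySem.Dict.modify (⟨[(4, b4), (3, b3), (2, b2), (1, b1), (0, b0)]⟩ : PySem.Dict Int (List (List Int))) c [] (fun w => w ++ [v]) =
    ⟨[(4, if c == 4 then b4 ++ [v] else b4), (3, if c == 3 then b3 ++ [v] else b3),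
      (2, if c == 2 then b2 ++ [v] else b2), (1, if c == 1 then b1 ++ [v] else b1),
      (0, if c == 0 then b0 ++ [v] else b0)]⟩ := by
  interval_cases c <;> rfl

theorem elig_eq (grid : List (List Bool)) (p : List Int) :
    (pvGridAt grid (PySem.List.pyGetD p 0 0) (PySem.List.pyGetD p 1 0) == false) = pvElig grid p := rfl

theorem cntA_eq (grid : List (List Bool)) (n : Int) (p : List Int) :
    pvCountA grid n (PySem.List.pyGetD p 0 0) (PySem.List.pyGetD p 1 0) = pvCnt grid n p := by
  rw [pvCount_eq]; rfl

-- A's loop body, with the abbreviations folded in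
def pvStepA (grid : List (List Bool)) (n : Int) (d : PySem.Dict Int (List (List Int))) (p : List Int) : PySem.Dict Int (List (List Int)) :=
  if pvElig grid p = true then PySem.Dict.modify d (pvCnt grid n p) [] (fun v => v ++ [pvCell p]) else d

theorem stepA_eq (grid : List (List Bool)) (n : Int) :
    (fun (d : PySem.Dict Int (List (List Int))) (p : List Int) =>
      let x := PySem.List.pyGetD p 0 0
      let y := PySem.List.pyGetD p 1 0
      if pvGridAt grid x y == false then
        PySem.Dict.modify d (pvCountA grid n x y) [] (fun v => v ++ [[x, y]])
      else d) = pvStepA grid n := by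
  funext d p
  unfold pvStepA
  simp only [elig_eq, cntA_eq]
  rfl

theorem comp_append (b bucket' : List (List Int)) (cell : List Int) (c k : Int) :
    (if c == k then b ++ [cell] else b) ++ bucket' = b ++ ((if c == k then [cell] else []) ++ bucket') := by
  cases h : (c == k) <;> simp

theorem loopA_char (grid : List (List Bool)) (n : Int) (l : List (List Int)) :
    ∀ b4 b3 b2 b1 b0 : List (List Int),
      l.foldl (pvStepA grid n) ⟨[(4, b4), (3, b3), (2, b2), (1, b1), (0, b0)]⟩ =
      ⟨[(4, b4 ++ pvBucket grid n 4 l), (3, b3 ++ pvBucket grid n 3 l),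
        (2, b2 ++ pvBucket grid n 2 l), (1, b1 ++ pvBucket grid n 1 l),
        (0, b0 ++ pvBucket grid n 0 l)]⟩ := by
  induction l with
  | nil => intro b4 b3 b2 b1 b0; simp [pvBucket]
  | cons p l ih =>
    intro b4 b3 b2 b1 b0
    rw [List.foldl_cons]
    cases he : pvElig grid p
    · have hstep : ∀ d : PySem.Dict Int (List (List Int)), pvStepA grid n d p = d := by
        intro d; simp [pvStepA, he]
      rw [hstep, ih]
      refine congrArg _ ?_
      simp [bucket_cons, he]
    · have hstep : ∀ d : PySem.Dict Int (List (List Int)),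
          pvStepA grid n d p = PySem.Dict.modify d (pvCnt grid n p) [] (fun v => v ++ [pvCell p]) := by
        intro d; simp [pvStepA, he]
      rw [hstep, modify_bucket _ _ _ _ _ _ _ (cnt_nonneg grid n p) (cnt_le_four grid n p), ih]
      refine congrArg _ ?_
      simp only [bucket_cons, he, Bool.true_and, comp_append]

theorem stepB_elig_eq (grid : List (List Bool)) (p : List Int) :
    pvEmptyAt grid (PySem.List.pyGetD p 0 0) (PySem.List.pyGetD p 1 0) = pvElig grid p := rfl

theorem loopB_char (grid : List (List Bool)) (n : Int) (l : List (List Int)) :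
    l.foldl (pvStepB grid n) (-1, []) = (pvM grid n l, pvBucket grid n (pvM grid n l) l) := by
  induction l using List.reverseRecOn with
  | nil => rfl
  | append_singleton l p ih =>
    rw [List.foldl_append, List.foldl_cons, List.foldl_nil, ih]
    unfold pvStepB
    simp only [stepB_elig_eq]
    have hcnt : pvCountB grid n (PySem.List.pyGetD p 0 0) (PySem.List.pyGetD p 1 0) = pvCnt grid n p := rfl
    have hcell : [PySem.List.pyGetD p 0 0, PySem.List.pyGetD p 1 0] = pvCell p := rfl
    simp only [hcnt, hcell]
    cases he : pvElig grid p
    · rw [if_neg (by simp [he])]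
      rw [M_append, bucket_append]
      simp [he]
    · rw [if_pos (by simp [he])]
      rcases lt_trichotomy (pvM grid n l) (pvCnt grid n p) with hlt | heq | hgt
      · have hM' : pvM grid n (l ++ [p]) = pvCnt grid n p := by
          rw [M_append]; simp [he, max_eq_right (le_of_lt hlt)]
        have hB' : pvBucket grid n (pvCnt grid n p) (l ++ [p]) = [pvCell p] := by
          rw [bucket_append, M_lt_bucket_nil grid n l _ hlt]; simp [he]
        rw [hM', hB', if_pos hlt]
      · have hM' : pvM grid n (l ++ [p]) = pvM grid n l := by
          rw [M_append]; simp [he, ← heq]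
        have hB' : pvBucket grid n (pvM grid n l) (l ++ [p]) = pvBucket grid n (pvM grid n l) l ++ [pvCell p] := by
          rw [bucket_append]; simp [he, ← heq]
        rw [hM', hB', if_neg (by omega), if_pos (by simp [heq])]
      · have hM' : pvM grid n (l ++ [p]) = pvM grid n l := by
          rw [M_append]; simp [he, max_eq_left (le_of_lt hgt)]
        have hB' : pvBucket grid n (pvM grid n l) (l ++ [p]) = pvBucket grid n (pvM grid n l) l := by
          rw [bucket_append]
          have hf : (pvElig grid p && pvCnt grid n p == pvM grid n l) = false := by
            simp only [he, Bool.true_and, beq_eq_false_iff_ne]; omega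
          rw [hf]; simp
        rw [hM', hB', if_neg (by omega), if_neg (by simp only [beq_iff_eq]; omega)]

theorem ports_agree (grid : List (List Bool)) (check : Bool) (n : Int) (total_list : List (List Int)) :
    check_two grid check n total_list = check_two_alt grid check n total_list := by
  cases check
  · have hinit : (PySem.Dict.ofList [((4:Int), ([]:List (List Int))), (3, []), (2, []), (1, []), (0, [])]) =
        (⟨[(4, []), (3, []), (2, []), (1, []), (0, [])]⟩ : PySem.Dict Int (List (List Int))) := rfl
    unfold check_two check_two_alt
    simp only [stepA_eq, hinit, loopA_char, loopB_char, List.nil_append, beq_self_eq_true, if_true]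
    by_cases hM : 0 ≤ pvM grid n total_list
    · have h4 := M_le_four grid n total_list
      have hne := bucket_M_ne_nil grid n total_list hM
      have hlen := List.length_pos_iff.mpr hne
      have hcases : pvM grid n total_list = 0 ∨ pvM grid n total_list = 1 ∨ pvM grid n total_list = 2 ∨
          pvM grid n total_list = 3 ∨ pvM grid n total_list = 4 := by omega
      rcases hcases with h | h | h | h | h
      · rw [h] at hlen ⊢
        rw [M_lt_bucket_nil grid n total_list 4 (by omega), M_lt_bucket_nil grid n total_list 3 (by omega),
          M_lt_bucket_nil grid n total_list 2 (by omega), M_lt_bucket_nil grid n total_list 1 (by omega)]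
        simp [pvPick, hlen]
      · rw [h] at hlen ⊢
        rw [M_lt_bucket_nil grid n total_list 4 (by omega), M_lt_bucket_nil grid n total_list 3 (by omega),
          M_lt_bucket_nil grid n total_list 2 (by omega)]
        simp [pvPick, hlen]
      · rw [h] at hlen ⊢
        rw [M_lt_bucket_nil grid n total_list 4 (by omega), M_lt_bucket_nil grid n total_list 3 (by omega)]
        simp [pvPick, hlen]
      · rw [h] at hlen ⊢
        rw [M_lt_bucket_nil grid n total_list 4 (by omega)]
        simp [pvPick, hlen]
      · rw [h] at hlen ⊢
        simp [pvPick, hlen]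
    · rw [M_lt_bucket_nil grid n total_list 4 (by omega), M_lt_bucket_nil grid n total_list 3 (by omega),
        M_lt_bucket_nil grid n total_list 2 (by omega), M_lt_bucket_nil grid n total_list 1 (by omega),
        M_lt_bucket_nil grid n total_list 0 (by omega)]
      simp [pvPick, hM]
  · rfl
-- ===== VERDICT (by name: the statement is the Claim_ definition above) =====
theorem check_two_spec : Claim_equal_check_two := by
  intro grid check n total_list _ _
  exact ports_agree grid check n total_list
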